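-- pv_equiv track=rewrite | github.com/cleitonleonel/pyquotex | pyquotex/utils/services.py | group_by_period
-- ===== SOURCE A (Python) =====
-- from collections import defaultdict
-- from typing import Any, Callable
--
-- def group_by_period(
--         data: list[list[Any]],
--         period: int
-- ) -> dict[int, list[list[Any]]]:
--     """Group tick data by timeframe period."""
--     grouped = defaultdict(list)
--     for tick in data:
--         timestamp = int(tick[0])
--         timeframe = int(timestamp // period)
--         grouped[timeframe].append(tick)
--     return dict(grouped)
-- ===== SOURCE B (Python) =====
-- def group_by_period(data, period):
--     """Group tick data by timeframe period."""
--     keys = dict.fromkeys(int(t[0]) // period for t in data)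
--     return {k: [t for t in data if int(t[0]) // period == k] for k in keys}
-- ===== Notes on version B (the rewrite author's own statement) =====
-- stated objective: simpler
-- what changed: Replaces the defaultdict append loop with an ordered dedup of the timeframe keys followed by one filter pass per key (a dict comprehension), so no mutable per-key accumulator is maintained.
import Mathlib
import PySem

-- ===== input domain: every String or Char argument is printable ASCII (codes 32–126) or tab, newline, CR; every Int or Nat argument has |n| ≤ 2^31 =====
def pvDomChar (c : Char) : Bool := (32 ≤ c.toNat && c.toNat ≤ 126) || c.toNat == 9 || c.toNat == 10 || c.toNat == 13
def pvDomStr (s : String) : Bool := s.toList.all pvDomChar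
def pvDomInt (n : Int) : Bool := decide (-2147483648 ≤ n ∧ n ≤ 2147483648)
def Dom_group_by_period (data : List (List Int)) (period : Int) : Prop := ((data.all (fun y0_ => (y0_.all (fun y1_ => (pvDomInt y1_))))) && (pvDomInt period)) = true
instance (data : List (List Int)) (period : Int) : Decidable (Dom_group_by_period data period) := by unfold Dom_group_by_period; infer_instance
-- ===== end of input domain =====

-- B replaces A's single-pass defaultdict-append with ordered key dedup + one filter per key (a dict comprehension): simpler, not faster.

-- ===== PORT A =====
def group_by_period (data : List (List Int)) (period : Int) : List (Int × List (List Int)) :=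
  (data.foldl (fun (grouped : PySem.Dict Int (List (List Int))) tick =>
      let timestamp := PySem.List.pyGetD tick 0 0
      let timeframe := PySem.Int.floordiv timestamp period
      grouped.modify timeframe [] (· ++ [tick]))
    PySem.Dict.empty).items

-- ===== PORT B =====
def group_by_period_alt (data : List (List Int)) (period : Int) : List (Int × List (List Int)) :=
  let keys := PySem.List.dedup (data.map (fun t => PySem.Int.floordiv (PySem.List.pyGetD t 0 0) period))
  keys.map (fun k => (k, data.filter (fun t => PySem.Int.floordiv (PySem.List.pyGetD t 0 0) period == k)))

-- ===== PRECONDITION & SPEC =====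
-- Pre_ excludes exactly the inputs where A raises: an empty tick (IndexError on tick[0]), or period = 0 with nonempty data (ZeroDivisionError).
def Pre_group_by_period (data : List (List Int)) (period : Int) : Prop :=
  (∀ t ∈ data, t ≠ []) ∧ (period ≠ 0 ∨ data = [])
instance (data : List (List Int)) (period : Int) : Decidable (Pre_group_by_period data period) := by unfold Pre_group_by_period; infer_instance

def pvWitness_group_by_period : List (List Int) × Int := ([[5, 1], [7, 2], [125, 3]], 60)

def Spec_group_by_period (data : List (List Int)) (period : Int) (out : List (Int × List (List Int))) : Prop := out = group_by_period_alt data period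
instance (data : List (List Int)) (period : Int) (out : List (Int × List (List Int))) : Decidable (Spec_group_by_period data period out) := by unfold Spec_group_by_period; infer_instance

-- ===== CLAIM (what is proved, stated in full; the proofs are below) =====
def Claim_equal_group_by_period : Prop := ∀ (data : List (List Int)) (period : Int), Dom_group_by_period data period → Pre_group_by_period data period → Spec_group_by_period data period (group_by_period data period)

-- ===== LEMMAS AND PROOFS =====

-- ===== VERDICT (by name: the statement is the Claim_ definition above) =====
theorem group_by_period_spec : Claim_equal_group_by_period := by
  intro data period _ _
  unfold Spec_group_by_period group_by_period group_by_period_alt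
  set key : List Int → Int := fun t => PySem.Int.floordiv (PySem.List.pyGetD t 0 0) period with hkey
  show (data.foldl (fun g t => g.modify (key t) [] (· ++ [t])) PySem.Dict.empty).items = _
  set D := data.foldl (fun (g : PySem.Dict Int (List (List Int))) t => g.modify (key t) [] (· ++ [t])) PySem.Dict.empty with hD
  have hnd : D.keys.Nodup := PySem.Dict.nodup_keys_foldl_modify_key data key [] (fun _ t => (· ++ [t])) PySem.Dict.empty (by simp)
  have hkeys : D.keys = PySem.List.dedup (data.map key) := by
    rw [hD, PySem.Dict.keys_foldl_modify_key, PySem.Dict.keys_empty]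
    simp [PySem.Set.update, PySem.Set.ofList, PySem.List.dedup_eq_ofList]
  have hgetD : ∀ c, D.getD c [] = data.filter (fun t => key t == c) := by
    intro c
    have hfold : D = (data.map (fun t => (key t, t))).foldl (fun g p => g.modify p.1 [] (· ++ [p.2])) PySem.Dict.empty := by
      rw [hD, List.foldl_map]
    rw [hfold, PySem.Dict.getD_foldl_modify_append]
    simp [List.filter_map, Function.comp_def]
  rw [PySem.Dict.items_eq_map_keys D hnd [], hkeys]
  apply List.map_congr_left
  intro k _
  rw [hgetD]
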